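-- pv_equiv track=rewrite | github.com/mattF11/ansel | tools/find-null-checks.py | find_literal_ranges
-- ===== SOURCE A (Python) =====
-- def find_literal_ranges(text: str):
--     ranges = []
--     i = 0
--     L = len(text)
--     while i < L:
--         c = text[i]
--         if c == '"' or c == "'":
--             q = c
--             start = i
--             i += 1
--             while i < L:
--                 if text[i] == '\\':
--                     i += 2
--                     continue
--                 if text[i] == q:
--                     i += 1
--                     break
--                 i += 1
--             end = i
--             ranges.append((start, end))
--         else:
--             i += 1
--     return ranges
-- ===== SOURCE B (Python) =====
-- def find_literal_ranges(text: str):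
--     # one-pass state machine over the characters
--     ranges = []
--     quote = None     # the quote character of the literal we are inside, if any
--     start = 0
--     skip = False     # the previous character was an escaping backslash
--     for pos, c in enumerate(text):
--         if quote is None:
--             if c in '"\'':
--                 quote, start = c, pos
--         elif skip:
--             skip = False
--         elif c == '\\':
--             skip = True
--         elif c == quote:
--             ranges.append((start, pos + 1))
--             quote = None
--     if quote is not None:
--         ranges.append((start, len(text)))
--     return ranges
-- ===== Notes on version B (the rewrite author's own statement) =====
-- stated objective: alternative
-- what changed: Replaced A's nested while-loops with manual index jumps (i += 2 over escapes, an inner loop hunting the closing quote) by a single for-pass state machine over enumerate(text) carrying (current quote, start, pending-escape flag); the one uniform loop avoids the interpreter overhead of A's inner-loop bookkeeping, a constant-factor speedup.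
-- intended difference: On texts that end inside an unterminated quoted literal with a pending backslash escape (odd trailing backslash run), A's unconditional i += 2 overshoots and it returns a final range ending at len(text)+1, an index past the end of the text; B ends that range at len(text), the intended end of an unterminated literal. — e.g. on find_literal_ranges("\"\\"): A returns [(0, 3)], B returns [(0, 2)]
import Mathlib
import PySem

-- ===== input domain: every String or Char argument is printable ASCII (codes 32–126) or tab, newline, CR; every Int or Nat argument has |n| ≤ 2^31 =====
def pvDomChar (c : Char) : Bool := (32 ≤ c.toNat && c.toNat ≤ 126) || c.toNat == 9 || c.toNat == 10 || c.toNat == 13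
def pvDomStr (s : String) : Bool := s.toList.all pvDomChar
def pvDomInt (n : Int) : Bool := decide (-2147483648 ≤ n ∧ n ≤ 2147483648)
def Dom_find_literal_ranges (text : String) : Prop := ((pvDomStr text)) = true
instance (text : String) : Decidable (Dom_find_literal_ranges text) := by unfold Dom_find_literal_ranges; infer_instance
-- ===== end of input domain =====

-- B replaces A's nested index-jumping while-loops by a one-pass state machine (alternative, same
-- cost); A and B differ only on texts ending in an open literal with a pending escape (see D_).

-- ===== PORT A =====
-- inner while loop of A: scan for the closing quote from index i (escapes jump two);
-- fuel only makes the recursion structural: L + 1 steps always suffice (each step advances i)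
def pvAInner (cs : List Char) (q : Char) (L : Nat) : Nat → Nat → Nat
  | 0, i => i
  | fuel + 1, i =>
    if i < L then
      if cs.getD i ' ' = '\\' then pvAInner cs q L fuel (i + 2)
      else if cs.getD i ' ' = q then i + 1
      else pvAInner cs q L fuel (i + 1)
    else i

-- outer while loop of A (same fuel guard)
def pvAOuter (cs : List Char) (L : Nat) : Nat → Nat → List (Int × Int) → List (Int × Int)
  | 0, _, acc => acc
  | fuel + 1, i, acc =>
    if i < L then
      let c := cs.getD i ' '
      if c = '"' ∨ c = '\'' then
        let e := pvAInner cs c L (L + 1) (i + 1)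
        pvAOuter cs L fuel e (acc ++ [((i : Int), (e : Int))])
      else pvAOuter cs L fuel (i + 1) acc
    else acc

def find_literal_ranges (text : String) : List (Int × Int) :=
  pvAOuter text.toList text.toList.length (text.toList.length + 1) 0 []

-- ===== PORT B =====
-- the for-loop of B: state = none (outside) / some (quote, start); skip = pending escape
def pvBLoop (cs : List Char) (pos : Nat) (acc : List (Int × Int))
    (st : Option (Char × Nat)) (skip : Bool) :
    List (Int × Int) × Option (Char × Nat) × Bool :=
  match cs with
  | [] => (acc, st, skip)
  | c :: rest =>
    match st with
    | none =>
      if c = '"' ∨ c = '\'' then pvBLoop rest (pos + 1) acc (some (c, pos)) skip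
      else pvBLoop rest (pos + 1) acc none skip
    | some (q, start) =>
      if skip then pvBLoop rest (pos + 1) acc (some (q, start)) false
      else if c = '\\' then pvBLoop rest (pos + 1) acc (some (q, start)) true
      else if c = q then pvBLoop rest (pos + 1) (acc ++ [((start : Int), (pos : Int) + 1)]) none skip
      else pvBLoop rest (pos + 1) acc (some (q, start)) skip

-- B's final flush of an unterminated literal
def pvBFin (L : Nat) (r : List (Int × Int) × Option (Char × Nat) × Bool) : List (Int × Int) :=
  match r.2.1 with
  | some (_, start) => r.1 ++ [((start : Int), (L : Int))]
  | none => r.1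

def find_literal_ranges_alt (text : String) : List (Int × Int) :=
  pvBFin text.toList.length (pvBLoop text.toList 0 [] none false)

-- ===== PRECONDITION & SPEC =====
-- step of the end-of-text scan state: none = outside any literal, some (q, pending) = inside a
-- literal quoted by q, pending = the previous character was an escaping backslash; used only to
-- STATE the change region D_ (it computes neither program's output)
def pvEscState (s : Option (Char × Bool)) (c : Char) : Option (Char × Bool) :=
  match s with
  | some ⟨q, pend⟩ =>
    if pend then some ⟨q, false⟩
    else if c == '\\' then some ⟨q, true⟩
    else if c == q then none else s
  | none => if c == '"' || c == '\'' then some ⟨c, false⟩ else none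

-- On texts ending inside an unterminated quoted literal with a pending backslash escape, A's
-- unconditional i += 2 overshoots and its last range ends at len(text)+1, past the end of the
-- text; B ends that range at len(text), the intended end of an unterminated literal.
def D_find_literal_ranges (text : String) : Prop :=
  (text.toList.foldl pvEscState none).any Prod.snd = true
instance (text : String) : Decidable (D_find_literal_ranges text) := by
  unfold D_find_literal_ranges; infer_instance

def Spec_find_literal_ranges (text : String) (out : List (Int × Int)) : Prop :=
  ¬ D_find_literal_ranges text → out = find_literal_ranges_alt text
instance (text : String) (out : List (Int × Int)) : Decidable (Spec_find_literal_ranges text out) := by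
  unfold Spec_find_literal_ranges; infer_instance

def pvDiffWitness_find_literal_ranges : String := "\"\\"
def pvDiffWitnessOut_find_literal_ranges : (List (Int × Int)) × (List (Int × Int)) :=
  ([(0, 3)], [(0, 2)])

-- ===== CLAIM (what is proved, stated in full; the proofs are below) =====
def Claim_unchanged_find_literal_ranges : Prop :=
  ∀ (text : String), Dom_find_literal_ranges text →
    Spec_find_literal_ranges text (find_literal_ranges text)
def Claim_changed_find_literal_ranges : Prop :=
  Dom_find_literal_ranges (pvDiffWitness_find_literal_ranges) ∧
  D_find_literal_ranges (pvDiffWitness_find_literal_ranges) ∧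
  find_literal_ranges (pvDiffWitness_find_literal_ranges) = pvDiffWitnessOut_find_literal_ranges.1 ∧
  find_literal_ranges_alt (pvDiffWitness_find_literal_ranges) = pvDiffWitnessOut_find_literal_ranges.2 ∧
  pvDiffWitnessOut_find_literal_ranges.1 ≠ pvDiffWitnessOut_find_literal_ranges.2

-- ===== LEMMAS AND PROOFS =====

lemma pvDropCons (cs : List Char) (j : Nat) (h : j < cs.length) :
    cs.drop j = cs.getD j ' ' :: cs.drop (j + 1) := by
  rw [List.getD_eq_getElem cs ' ' h]
  exact List.drop_eq_getElem_cons h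

lemma pvAInner_ge (cs : List Char) (q : Char) (L : Nat) :
    ∀ f i, i ≤ pvAInner cs q L f i := by
  intro f
  induction f with
  | zero => intro i; exact le_refl i
  | succ f ih =>
    intro i
    rw [pvAInner]
    split_ifs with h1 h2 h3
    · exact le_trans (by omega) (ih (i + 2))
    · omega
    · exact le_trans (by omega) (ih (i + 1))
    · exact le_refl i

lemma pvAInner_of_le (cs : List Char) (q : Char) (L : Nat) :
    ∀ f i, L ≤ i → pvAInner cs q L f i = i := by
  intro f i h
  cases f with
  | zero => rfl
  | succ f => rw [pvAInner, if_neg (by omega : ¬ i < L)]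

-- shorthand for the ¬D-side hypothesis about a suffix scan state
def pvNoPend (cs : List Char) (st : Option (Char × Bool)) : Prop :=
  ¬ ((cs.foldl pvEscState st).any Prod.snd = true)


lemma pvEsc_none (c : Char) (h : c = '"' ∨ c = '\'') :
    pvEscState none c = some (c, false) := by
  rcases h with rfl | rfl <;> rfl

lemma pvEsc_none' (c : Char) (h : ¬ (c = '"' ∨ c = '\'')) :
    pvEscState none c = none := by
  have h1 : c ≠ '"' := fun e => h (Or.inl e)
  have h2 : c ≠ '\'' := fun e => h (Or.inr e)
  simp [pvEscState, h1, h2]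

lemma pvEsc_skip (c : Char) (q : Char) : pvEscState (some (q, true)) c = some (q, false) := rfl

lemma pvEsc_bs (q : Char) : pvEscState (some (q, false)) '\\' = some (q, true) := by
  simp [pvEscState]

lemma pvEsc_close (c q : Char) (hbs : ¬ c = '\\') (hq : c = q) :
    pvEscState (some (q, false)) c = none := by
  subst hq; simp [pvEscState, hbs]

lemma pvEsc_other (c q : Char) (hbs : ¬ c = '\\') (hq : ¬ c = q) :
    pvEscState (some (q, false)) c = some (q, false) := by
  simp [pvEscState, hbs, hq]

-- B's pass through an open literal agrees with A's inner scan, provided the suffix does not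
-- end with a pending escape; and the no-pending-escape fact transfers to the resumed scan
lemma pvInnerEq (cs : List Char) (q : Char) :
    ∀ f j, j ≤ cs.length → cs.length - j ≤ f → pvNoPend (cs.drop j) (some (q, false)) →
      ((∀ acc start,
        pvBFin cs.length (pvBLoop (cs.drop j) j acc (some (q, start)) false) =
        pvBFin cs.length
          (pvBLoop (cs.drop (pvAInner cs q cs.length f j)) (pvAInner cs q cs.length f j)
            (acc ++ [((start : Int), ((pvAInner cs q cs.length f j : Nat) : Int))]) none false)) ∧
       pvNoPend (cs.drop (pvAInner cs q cs.length f j)) none) := by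
  intro f
  induction f with
  | zero =>
    intro j hj hn _
    have hjL : j = cs.length := by omega
    subst hjL
    constructor
    · intro acc start
      rw [pvAInner_of_le cs q cs.length 0 cs.length le_rfl]
      simp [List.drop_length, pvBLoop, pvBFin]
    · rw [pvAInner_of_le cs q cs.length 0 cs.length le_rfl]
      simp [pvNoPend, List.drop_length]
  | succ f ih =>
    intro j hj hn hp
    by_cases hjL : j < cs.length
    · have hcons := pvDropCons cs j hjL
      by_cases hbs : cs.getD j ' ' = '\\'
      · have hAstep : pvAInner cs q cs.length (f + 1) j = pvAInner cs q cs.length f (j + 2) := by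
          rw [pvAInner, if_pos hjL, if_pos hbs]
        by_cases h2 : j + 1 < cs.length
        · have hcons2 := pvDropCons cs (j + 1) h2
          have hpstep : pvNoPend (cs.drop (j + 2)) (some (q, false)) := by
            unfold pvNoPend at hp ⊢
            rw [hcons, List.foldl_cons, hbs, pvEsc_bs, hcons2, List.foldl_cons, pvEsc_skip] at hp
            exact hp
          have := ih (j + 2) (by omega) (by omega) hpstep
          rw [hAstep]
          refine ⟨?_, this.2⟩
          intro acc start
          rw [hcons, hcons2]
          simp only [pvBLoop, if_neg (Bool.false_ne_true), hbs]
          simpa using this.1 acc start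
        · -- trailing backslash: the pending-escape hypothesis is contradicted
          exfalso
          apply hp
          have hd1 : cs.drop (j + 1) = [] := List.drop_eq_nil_of_le (by omega)
          rw [hcons, List.foldl_cons, hbs, pvEsc_bs, hd1]
          simp
      · by_cases hq : cs.getD j ' ' = q
        · have hA : pvAInner cs q cs.length (f + 1) j = j + 1 := by
            rw [pvAInner, if_pos hjL, if_neg hbs, if_pos hq]
          rw [hA]
          constructor
          · intro acc start
            rw [hcons]
            simp only [pvBLoop, if_neg (Bool.false_ne_true), if_neg hbs, if_pos hq]
            rw [show ((j + 1 : Nat) : Int) = ((j : Int)) + 1 from by push_cast; ring]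
          · unfold pvNoPend at hp ⊢
            rw [hcons, List.foldl_cons, pvEsc_close _ _ hbs hq] at hp
            exact hp
        · have hA : pvAInner cs q cs.length (f + 1) j = pvAInner cs q cs.length f (j + 1) := by
            rw [pvAInner, if_pos hjL, if_neg hbs, if_neg hq]
          have hpstep : pvNoPend (cs.drop (j + 1)) (some (q, false)) := by
            unfold pvNoPend at hp ⊢
            rw [hcons, List.foldl_cons, pvEsc_other _ _ hbs hq] at hp
            exact hp
          have := ih (j + 1) (by omega) (by omega) hpstep
          rw [hA]
          refine ⟨?_, this.2⟩
          intro acc start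
          rw [hcons]
          simp only [pvBLoop, if_neg (Bool.false_ne_true), if_neg hbs, if_neg hq]
          exact this.1 acc start
    · have hjL' : j = cs.length := by omega
      subst hjL'
      constructor
      · intro acc start
        rw [pvAInner_of_le cs q cs.length (f + 1) cs.length le_rfl]
        simp [List.drop_length, pvBLoop, pvBFin]
      · rw [pvAInner_of_le cs q cs.length (f + 1) cs.length le_rfl]
        simp [pvNoPend, List.drop_length]

-- A's outer loop agrees with B's state machine resumed outside a literal
lemma pvOuterEq (cs : List Char) :
    ∀ f i acc, cs.length + 1 - i ≤ f → pvNoPend (cs.drop i) none →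
      pvAOuter cs cs.length f i acc =
      pvBFin cs.length (pvBLoop (cs.drop i) i acc none false) := by
  intro f
  induction f with
  | zero =>
    intro i acc h _
    rw [pvAOuter, List.drop_eq_nil_of_le (by omega)]
    simp [pvBLoop, pvBFin]
  | succ f ih =>
    intro i acc h hp
    by_cases hi : i < cs.length
    · have hcons := pvDropCons cs i hi
      rw [hcons, pvAOuter]
      by_cases hc : cs.getD i ' ' = '"' ∨ cs.getD i ' ' = '\''
      · simp only [if_pos hi, if_pos hc, pvBLoop]
        have he := pvAInner_ge cs (cs.getD i ' ') cs.length (cs.length + 1) (i + 1)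
        have hpstep : pvNoPend (cs.drop (i + 1)) (some (cs.getD i ' ', false)) := by
          unfold pvNoPend at hp ⊢
          rw [hcons, List.foldl_cons, pvEsc_none _ hc] at hp
          exact hp
        have hinner := pvInnerEq cs (cs.getD i ' ') (cs.length + 1) (i + 1) (by omega) (by omega) hpstep
        rw [hinner.1 acc i]
        exact ih _ _ (by omega) hinner.2
      · simp only [if_pos hi, if_neg hc, pvBLoop]
        have hpstep : pvNoPend (cs.drop (i + 1)) none := by
          unfold pvNoPend at hp ⊢
          rw [hcons, List.foldl_cons, pvEsc_none' _ hc] at hp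
          exact hp
        exact ih (i + 1) acc (by omega) hpstep
    · rw [pvAOuter, if_neg hi, List.drop_eq_nil_of_le (by omega)]
      simp [pvBLoop, pvBFin]

-- ===== VERDICT (by name: the statements are the Claim_ definitions above) =====
theorem find_literal_ranges_spec : Claim_unchanged_find_literal_ranges := by
  intro text _ hnd
  unfold find_literal_ranges find_literal_ranges_alt
  have hp : pvNoPend (text.toList.drop 0) none := by
    simp only [pvNoPend, List.drop_zero]
    exact hnd
  exact pvOuterEq text.toList (text.toList.length + 1) 0 [] (by omega) hp

theorem find_literal_ranges_changed : Claim_changed_find_literal_ranges := by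
  unfold Claim_changed_find_literal_ranges; decide
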